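-- pv_equiv track=rewrite | github.com/phani-kb/ham-radio-toolbox | src/hrt/processors/callsign_processor.py | match_callsigns_with_words
-- ===== SOURCE A (Python) =====
-- def match_callsigns_with_words(callsigns, words):
--     """Match callsigns with words, ignoring case."""
--     matched_callsigns = set()
--     matches_with_words = set()
--     for callsign in callsigns:
--         for word in words:
--             if word.lower() in callsign.lower():
--                 matched_callsigns.add(callsign)
--                 matches_with_words.add(f"{callsign} - {word}")
--                 break
--     return matched_callsigns, matches_with_words
-- ===== SOURCE B (Python) =====
-- def match_callsigns_with_words(callsigns, words):
--     """Match callsigns with words, ignoring case."""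
--     # Invert the loops: build an index dict mapping each callsign to the first
--     # matching word (words processed in order), lowercasing each string once.
--     callsigns_lc = [c.lower() for c in callsigns]
--     first = {}
--     for word in words:
--         wl = word.lower()
--         for callsign, cl in zip(callsigns, callsigns_lc):
--             if callsign not in first and wl in cl:
--                 first[callsign] = word
--     matched = {c for c in callsigns if c in first}
--     pairs = {f"{c} - {first[c]}" for c in callsigns if c in first}
--     return matched, pairs
-- ===== Notes on version B (the rewrite author's own statement) =====
-- stated objective: alternative
-- what changed: Inverts the loop nest: instead of scanning the word list per callsign with an early break, B makes one word-major pass that builds a dict mapping each callsign to its first matching word (lowercasing every string exactly once), then reads both result sets off that dict.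
import Mathlib
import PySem

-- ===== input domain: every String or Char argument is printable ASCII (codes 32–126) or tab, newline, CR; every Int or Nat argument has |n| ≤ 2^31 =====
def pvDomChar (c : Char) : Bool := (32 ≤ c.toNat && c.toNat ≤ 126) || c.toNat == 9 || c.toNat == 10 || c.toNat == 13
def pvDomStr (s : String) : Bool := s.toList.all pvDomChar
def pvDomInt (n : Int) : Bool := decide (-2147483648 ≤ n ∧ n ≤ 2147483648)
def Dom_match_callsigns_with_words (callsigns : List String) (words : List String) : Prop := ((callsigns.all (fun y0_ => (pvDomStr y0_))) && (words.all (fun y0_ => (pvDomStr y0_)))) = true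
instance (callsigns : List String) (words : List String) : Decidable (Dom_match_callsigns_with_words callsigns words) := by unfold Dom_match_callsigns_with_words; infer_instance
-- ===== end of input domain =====

-- B inverts the loops: it builds a dict from each callsign to its first matching word (word-major,
-- lowercasing every string once) and then reads the two result sets off that dict; same cost class,
-- alternative structure (objective: alternative).

-- f"{callsign} - {word}" (shared literal format of both Pythons)
def pvFmt (c w : String) : String := c ++ " - " ++ w

-- ===== PORT A =====
-- inner 'for word in words: … break' loop of A
def pvInnerA (c : String) (st : List String × List String) : List String → List String × List String
  | [] => st
  | w :: rest =>
    if PySem.Str.isIn (PySem.Str.lower w) (PySem.Str.lower c) then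
      (PySem.Set.add st.1 c, PySem.Set.add st.2 (pvFmt c w))
    else pvInnerA c st rest

def match_callsigns_with_words (callsigns : List String) (words : List String) : List String × List String :=
  callsigns.foldl (fun st callsign => pvInnerA callsign st words) (PySem.Set.empty, PySem.Set.empty)

-- ===== PORT B =====
def match_callsigns_with_words_alt (callsigns : List String) (words : List String) : List String × List String :=
  let callsignsLc := callsigns.map PySem.Str.lower
  let first : PySem.Dict String String :=
    words.foldl (fun d w =>
      let wl := PySem.Str.lower w
      (callsigns.zip callsignsLc).foldl
        (fun d p =>
          if !(PySem.Dict.contains d p.1) && PySem.Str.isIn wl p.2 then PySem.Dict.insert d p.1 w else d)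
        d)
      PySem.Dict.empty
  (PySem.Set.ofList (callsigns.filter (fun c => PySem.Dict.contains first c)),
   PySem.Set.ofList ((callsigns.filter (fun c => PySem.Dict.contains first c)).map
     (fun c => pvFmt c (PySem.Dict.getD first c ""))))

-- ===== PRECONDITION & SPEC =====
def Spec_match_callsigns_with_words (callsigns : List String) (words : List String) (out : List String × List String) : Prop := out = match_callsigns_with_words_alt callsigns words
instance (callsigns : List String) (words : List String) (out : List String × List String) : Decidable (Spec_match_callsigns_with_words callsigns words out) := by unfold Spec_match_callsigns_with_words; infer_instance

-- ===== CLAIM (what is proved, stated in full; the proofs are below) =====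
def Claim_equal_match_callsigns_with_words : Prop := ∀ (callsigns : List String) (words : List String), Dom_match_callsigns_with_words callsigns words → Spec_match_callsigns_with_words callsigns words (match_callsigns_with_words callsigns words)

-- ===== LEMMAS AND PROOFS =====

-- the first word (in order) whose lowercase form occurs in c's lowercase form
def pvFM (c : String) (ws : List String) : Option String :=
  (ws.filter (fun w => PySem.Str.isIn (PySem.Str.lower w) (PySem.Str.lower c))).head?

theorem pvFM_cons (c w : String) (rest : List String) :
    pvFM c (w :: rest) =
      if PySem.Str.isIn (PySem.Str.lower w) (PySem.Str.lower c) then some w else pvFM c rest := by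
  simp only [pvFM, List.filter_cons]
  split_ifs <;> rfl

theorem pvInnerA_eq (c : String) (st : List String × List String) (ws : List String) :
    pvInnerA c st ws =
      match pvFM c ws with
      | none => st
      | some w => (PySem.Set.add st.1 c, PySem.Set.add st.2 (pvFmt c w)) := by
  induction ws with
  | nil => rfl
  | cons w rest ih =>
    rw [pvFM_cons]
    simp only [pvInnerA]
    by_cases h : PySem.Str.isIn (PySem.Str.lower w) (PySem.Str.lower c)
    · rw [if_pos h, if_pos h]
    · rw [if_neg h, if_neg h]; exact ih

-- one word pass of B's dict-building loop
theorem pvInner_get (w : String) (cs : List String) (d : PySem.Dict String String) (c : String) :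
    PySem.Dict.get?
      (cs.foldl (fun d a =>
        if !(PySem.Dict.contains d a) && PySem.Str.isIn (PySem.Str.lower w) (PySem.Str.lower a)
        then PySem.Dict.insert d a w else d) d) c
    = (PySem.Dict.get? d c).or
        (if c ∈ cs ∧ PySem.Str.isIn (PySem.Str.lower w) (PySem.Str.lower c) then some w else none) := by
  induction cs generalizing d with
  | nil => simp
  | cons a rest ih =>
    simp only [List.foldl_cons]
    by_cases ha : (!(PySem.Dict.contains d a) && PySem.Str.isIn (PySem.Str.lower w) (PySem.Str.lower a)) = true
    · rw [if_pos ha, ih]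
      rw [Bool.and_eq_true, Bool.not_eq_true'] at ha
      have hnone : PySem.Dict.get? d a = none := by
        have := PySem.Dict.contains_eq_isSome_get? (d := d) (k := a)
        rw [ha.1] at this
        exact Option.not_isSome_iff_eq_none.mp (by rw [← this]; simp)
      by_cases hc : c = a
      · subst hc
        rw [PySem.Dict.get?_insert_self, hnone]
        have : (c ∈ c :: rest ∧ PySem.Str.isIn (PySem.Str.lower w) (PySem.Str.lower c)) := ⟨List.mem_cons_self, ha.2⟩
        rw [if_pos this]
        cases hmem : (if c ∈ rest ∧ PySem.Str.isIn (PySem.Str.lower w) (PySem.Str.lower c) then some w else none) with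
        | none => rfl
        | some v =>
          have : v = w := by
            by_cases h2 : (c ∈ rest ∧ PySem.Str.isIn (PySem.Str.lower w) (PySem.Str.lower c))
            · rw [if_pos h2] at hmem; exact (Option.some.inj hmem).symm
            · rw [if_neg h2] at hmem; cases hmem
          rw [this]; rfl
      · rw [PySem.Dict.get?_insert, if_neg hc]
        have : (c ∈ a :: rest ∧ PySem.Str.isIn (PySem.Str.lower w) (PySem.Str.lower c))
            ↔ (c ∈ rest ∧ PySem.Str.isIn (PySem.Str.lower w) (PySem.Str.lower c)) := by
          simp [List.mem_cons, hc]
        simp only [this]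
    · rw [if_neg ha, ih]
      by_cases hc : c = a
      · subst hc
        rw [Bool.and_eq_true, Bool.not_eq_true'] at ha
        by_cases hcont : PySem.Dict.contains d c = true
        · have hsome : (PySem.Dict.get? d c).isSome := by
            rw [← PySem.Dict.contains_eq_isSome_get?]; exact hcont
          obtain ⟨v, hv⟩ := Option.isSome_iff_exists.mp hsome
          rw [hv]; rfl
        · have hcf : PySem.Dict.contains d c = false := by
            cases h : PySem.Dict.contains d c <;> simp_all
          have hp : ¬ PySem.Str.isIn (PySem.Str.lower w) (PySem.Str.lower c) = true :=
            not_and.mp ha hcf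
          rw [if_neg (by tauto), if_neg (by tauto)]
      · have : (c ∈ a :: rest ∧ PySem.Str.isIn (PySem.Str.lower w) (PySem.Str.lower c))
            ↔ (c ∈ rest ∧ PySem.Str.isIn (PySem.Str.lower w) (PySem.Str.lower c)) := by
          simp [List.mem_cons, hc]
        simp only [this]

-- the whole dict-building loop
theorem pvBuild_get (ws : List String) (cs : List String) (d : PySem.Dict String String) (c : String) :
    PySem.Dict.get?
      (ws.foldl (fun d w =>
        cs.foldl (fun d a =>
          if !(PySem.Dict.contains d a) && PySem.Str.isIn (PySem.Str.lower w) (PySem.Str.lower a)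
          then PySem.Dict.insert d a w else d) d) d) c
    = (PySem.Dict.get? d c).or (if c ∈ cs then pvFM c ws else none) := by
  induction ws generalizing d with
  | nil => simp [pvFM]
  | cons w restW ih =>
    simp only [List.foldl_cons]
    rw [ih, pvInner_get, Option.or_assoc]
    congr 1
    by_cases hm : c ∈ cs
    · simp only [pvFM_cons, if_pos hm]
      simp only [and_iff_right hm]
      split_ifs <;> rfl
    · simp [hm]

-- B's dict, named for the proofs (zeta-reduced body of the port)
def pvFirst (callsigns words : List String) : PySem.Dict String String :=
  words.foldl (fun d w =>
    (callsigns.zip (callsigns.map PySem.Str.lower)).foldl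
      (fun d p =>
        if !(PySem.Dict.contains d p.1) && PySem.Str.isIn (PySem.Str.lower w) p.2
        then PySem.Dict.insert d p.1 w else d) d)
    PySem.Dict.empty

theorem pvFirst_get (callsigns words : List String) (c : String) :
    PySem.Dict.get? (pvFirst callsigns words) c
      = if c ∈ callsigns then pvFM c words else none := by
  unfold pvFirst
  have hz : callsigns.zip (callsigns.map PySem.Str.lower)
      = callsigns.map (fun a => (a, PySem.Str.lower a)) :=
    (List.map_prod_left_eq_zip).symm
  simp only [hz, List.foldl_map]
  rw [pvBuild_get, PySem.Dict.get?_empty, Option.none_or]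

-- set-comprehension over a filter as one fold
theorem pvFoldFilter {α : Type} [DecidableEq α] (q : String → Bool) (f : String → α)
    (l : List String) (s : PySem.Set α) :
    (l.foldl (fun s c => if q c then PySem.Set.add s (f c) else s) s)
      = ((l.filter q).map f).foldl PySem.Set.add s := by
  induction l generalizing s with
  | nil => rfl
  | cons a rest ih =>
    by_cases h : q a <;> simp [h, ih]

-- A's one fold with a pair accumulator is B's two independent folds
theorem pvSplit (words : List String) (callsigns : List String) (m p : List String) :
    callsigns.foldl (fun st c => pvInnerA c st words) (m, p)
      = (callsigns.foldl
           (fun m c => match pvFM c words with | none => m | some _ => PySem.Set.add m c) m,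
         callsigns.foldl
           (fun p c => match pvFM c words with | none => p | some w => PySem.Set.add p (pvFmt c w)) p) := by
  induction callsigns generalizing m p with
  | nil => rfl
  | cons a rest ih =>
    simp only [List.foldl_cons]
    rw [pvInnerA_eq]
    cases pvFM a words
    · exact ih m p
    · exact ih _ _

-- ===== VERDICT (by name: the statement is the Claim_ definition above) =====
theorem match_callsigns_with_words_spec : Claim_equal_match_callsigns_with_words := by
  intro callsigns words _
  unfold Spec_match_callsigns_with_words
  show callsigns.foldl (fun st c => pvInnerA c st words) (PySem.Set.empty, PySem.Set.empty)
      = (PySem.Set.ofList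
           (callsigns.filter (fun c => PySem.Dict.contains (pvFirst callsigns words) c)),
         PySem.Set.ofList
           ((callsigns.filter (fun c => PySem.Dict.contains (pvFirst callsigns words) c)).map
             (fun c => pvFmt c (PySem.Dict.getD (pvFirst callsigns words) c ""))))
  rw [pvSplit]
  have hcont : ∀ c ∈ callsigns,
      PySem.Dict.contains (pvFirst callsigns words) c = (pvFM c words).isSome := by
    intro c hc
    rw [PySem.Dict.contains_eq_isSome_get?, pvFirst_get, if_pos hc]
  rw [Prod.mk.injEq]
  constructor
  · -- the matched_callsigns component
    have h1 : callsigns.foldl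
          (fun m c => match pvFM c words with | none => m | some _ => PySem.Set.add m c)
          PySem.Set.empty
        = callsigns.foldl
          (fun m c => if PySem.Dict.contains (pvFirst callsigns words) c
                      then PySem.Set.add m c else m)
          PySem.Set.empty := by
      apply PySem.List.foldl_congr_mem'
      intro c hc acc
      rw [hcont c hc]
      cases hfm : pvFM c words <;> simp
    rw [h1, pvFoldFilter (fun c => PySem.Dict.contains (pvFirst callsigns words) c) (fun c => c), List.map_id']
    rfl
  · -- the matches_with_words component
    have h2 : callsigns.foldl
          (fun p c => match pvFM c words with | none => p | some w => PySem.Set.add p (pvFmt c w))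
          PySem.Set.empty
        = callsigns.foldl
          (fun p c => if PySem.Dict.contains (pvFirst callsigns words) c
                      then PySem.Set.add p (pvFmt c (PySem.Dict.getD (pvFirst callsigns words) c ""))
                      else p)
          PySem.Set.empty := by
      apply PySem.List.foldl_congr_mem'
      intro c hc acc
      rw [hcont c hc]
      cases hfm : pvFM c words with
      | none => simp
      | some w =>
        have hg : PySem.Dict.getD (pvFirst callsigns words) c "" = w := by
          rw [PySem.Dict.getD_eq_get?_getD, pvFirst_get, if_pos hc, hfm]
          rfl
        simp [hg]
    rw [h2, pvFoldFilter (fun c => PySem.Dict.contains (pvFirst callsigns words) c)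
        (fun c => pvFmt c (PySem.Dict.getD (pvFirst callsigns words) c ""))]
    rfl
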